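-- pv_equiv track=rewrite | github.com/samuelospij/Python | ahorcado.py | obtenerLetrasDisponibles
-- ===== SOURCE A (Python) =====
-- def obtenerLetrasDisponibles(letrasIntentadas):
--     '''
--     Firma:
--         (string) -> (string)
--
--     Sinopsis:
--         Devuelve las letras que no se han empleado en los turnos.
--
--     Entradas y salidas:
--         - letrasIntentadas: string, letras intentadas por el usuario para adivinar la palabra
--         - returns: string, compuesto de letras que no han sido ingresado
--
--     Ejemplos de uso:
--         >>> letrasIntentadas = 'abfs'
--         >>> print obtenerLetrasDisponibles(letrasIntentadas)
--         cdeghijklmnopqrtuvwxyz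
--
--     '''
--
--     # Desarrolle el cuerpo de la función aquí...
--     import string
--     abc = "abcdefghijklmnopqrstuvwxyz "
--     letras_disponibles = ""
--     for i in abc:
--         if i not in letrasIntentadas:
--             letras_disponibles += i
--
--
-- 	# Retorno de las letras del alfabeto que aun no han sido usadas
--     return letras_disponibles
-- ===== SOURCE B (Python) =====
-- def obtenerLetrasDisponibles(letrasIntentadas):
--     disponibles = list("abcdefghijklmnopqrstuvwxyz ")
--     for c in letrasIntentadas:
--         if c in disponibles:
--             disponibles.remove(c)
--     return "".join(disponibles)
-- ===== Notes on version B (the rewrite author's own statement) =====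
-- stated objective: alternative
-- what changed: B inverts the traversal: instead of scanning the alphabet and membership-testing each letter against letrasIntentadas, it starts from the full alphabet as a list and iterates over letrasIntentadas, deleting each tried letter from the availability list, then joins what is left.
import Mathlib
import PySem

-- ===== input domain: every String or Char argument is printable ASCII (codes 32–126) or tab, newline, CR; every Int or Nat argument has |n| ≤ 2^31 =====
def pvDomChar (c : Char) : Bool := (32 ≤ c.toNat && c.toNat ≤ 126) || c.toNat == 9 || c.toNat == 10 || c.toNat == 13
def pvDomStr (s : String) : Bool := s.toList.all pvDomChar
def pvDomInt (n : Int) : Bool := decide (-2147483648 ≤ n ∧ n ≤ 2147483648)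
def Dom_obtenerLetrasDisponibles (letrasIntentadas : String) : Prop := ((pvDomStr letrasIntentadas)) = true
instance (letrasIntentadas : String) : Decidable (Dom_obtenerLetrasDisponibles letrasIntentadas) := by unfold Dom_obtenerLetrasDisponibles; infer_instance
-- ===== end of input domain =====

-- B inverts the traversal: it iterates over letrasIntentadas deleting letters from the
-- availability list, instead of A's scan of the alphabet with a membership test; objective: alternative.

-- ===== PORT A =====
-- for i in abc: if i not in letrasIntentadas: letras_disponibles += i
def obtenerLetrasDisponibles (letrasIntentadas : String) : String :=
  ("abcdefghijklmnopqrstuvwxyz ".toList).foldl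
    (fun letras_disponibles i =>
      if !(letrasIntentadas.toList.contains i) then letras_disponibles.push i
      else letras_disponibles) ""

-- ===== PORT B =====
-- disponibles = list(abc); for c in letrasIntentadas: if c in disponibles: disponibles.remove(c)
-- (the guard makes list.remove total; remove? is some here, getD is only the unwrap)
def obtenerLetrasDisponibles_alt (letrasIntentadas : String) : String :=
  let disponibles :=
    letrasIntentadas.toList.foldl
      (fun disponibles c =>
        if disponibles.contains c then (PySem.List.remove? disponibles c).getD disponibles
        else disponibles)
      ("abcdefghijklmnopqrstuvwxyz ".toList)
  String.ofList disponibles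

-- ===== PRECONDITION & SPEC =====
def Spec_obtenerLetrasDisponibles (letrasIntentadas : String) (out : String) : Prop := out = obtenerLetrasDisponibles_alt letrasIntentadas
instance (letrasIntentadas : String) (out : String) : Decidable (Spec_obtenerLetrasDisponibles letrasIntentadas out) := by unfold Spec_obtenerLetrasDisponibles; infer_instance

-- ===== CLAIM (what is proved, stated in full; the proofs are below) =====
def Claim_equal_obtenerLetrasDisponibles : Prop := ∀ (letrasIntentadas : String), Dom_obtenerLetrasDisponibles letrasIntentadas → Spec_obtenerLetrasDisponibles letrasIntentadas (obtenerLetrasDisponibles letrasIntentadas)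

-- ===== LEMMAS AND PROOFS =====

-- A's append-if loop is a filter collected onto the accumulator
theorem pv_push_eq (s : String) (c : Char) : s.push c = s ++ String.ofList [c] := by
  apply String.toList_injective; simp

theorem pv_foldl_push_filter (p : Char → Bool) (l : List Char) (acc : String) :
    l.foldl (fun s i => if p i then s.push i else s) acc
      = acc ++ String.ofList (l.filter p) := by
  induction l generalizing acc with
  | nil => simp
  | cons c t ih =>
    rw [List.foldl_cons]
    by_cases h : p c = true
    · rw [if_pos h, ih, pv_push_eq, String.append_assoc, ← String.ofList_append,
        List.filter_cons_of_pos h, List.singleton_append]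
    · rw [if_neg h, ih, List.filter_cons_of_neg h]

-- one step of B's loop on a duplicate-free list is a filter
theorem pv_remove_step (l : List Char) (c : Char) (hnd : l.Nodup) :
    (if l.contains c then (PySem.List.remove? l c).getD l else l)
      = l.filter (fun x => !(x == c)) := by
  by_cases h : c ∈ l
  · rw [if_pos (by simpa using h), PySem.List.remove?_eq_some_erase _ _ h,
      Option.getD_some, List.Nodup.erase_eq_filter hnd]
    apply List.filter_congr; intro x _; simp [bne]
  · rw [if_neg (by simpa using h)]
    exact (List.filter_eq_self.mpr (fun x hx => by
      simp only [Bool.not_eq_eq_eq_not, Bool.not_true, beq_eq_false_iff_ne]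
      exact fun he => h (he ▸ hx))).symm

-- B's whole loop on a duplicate-free list filters out the tried letters
theorem pv_foldl_remove_filter (s : List Char) (l : List Char) (hnd : l.Nodup) :
    s.foldl
      (fun disponibles c =>
        if disponibles.contains c then (PySem.List.remove? disponibles c).getD disponibles
        else disponibles) l
      = l.filter (fun x => !(s.contains x)) := by
  induction s generalizing l with
  | nil => simp
  | cons c t ih =>
    rw [List.foldl_cons, pv_remove_step l c hnd,
      ih _ (List.Nodup.filter _ hnd), List.filter_filter]
    apply List.filter_congr; intro x _
    by_cases hxc : x = c <;> simp [hxc, Bool.and_comm]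

-- ===== VERDICT (by name: the statement is the Claim_ definition above) =====
theorem obtenerLetrasDisponibles_spec : Claim_equal_obtenerLetrasDisponibles := by
  intro s _
  show _ = _
  rw [obtenerLetrasDisponibles, obtenerLetrasDisponibles_alt,
    pv_foldl_push_filter, pv_foldl_remove_filter _ _ (by decide)]
  simp
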